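-- pv_equiv track=rewrite | github.com/TheAlgorithms/Python | computer_networks/char_stuffing.py | char_stuffing
-- ===== SOURCE A (Python) =====
-- FLAG = "~"
--
-- ESC = "#"
--
-- def char_stuffing(string: str) -> str:
--     """
--     Return the char stuffed message
--     >>> char_stuffing("abc")
--     'abc'
--     >>> char_stuffing("a#b#c")
--     'a##b##c'
--     """
--     arr = []
--     # Create a list of characters from the string
--     for character in string:
--         arr.append(character)
--     for i in range(len(arr)):
--         # If we encounter the FLAG and it's not the first or last character
--         if arr[i] == FLAG and not (i == 0 or i == len(arr) - 1):
--             arr[i] = ESC + arr[i]  # Prepend ESC to FLAG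
--         elif arr[i] == ESC:
--             arr[i] += ESC  # Duplicate ESC
--     return "".join(arr)  # Join the list of characters back into a string
-- ===== SOURCE B (Python) =====
-- FLAG = "~"
-- ESC = "#"
--
--
-- def char_stuffing(string: str) -> str:
--     """Staged whole-string replace passes: double ESC everywhere; escape FLAG
--     only in the interior, by running the FLAG pass on string[1:-1] AFTER the
--     ESC pass (so the ESC inserted before a FLAG is not re-doubled)."""
--     if len(string) <= 1:
--         return string.replace(ESC, ESC + ESC)
--     return (
--         string[0].replace(ESC, ESC + ESC)
--         + string[1:-1].replace(ESC, ESC + ESC).replace(FLAG, ESC + FLAG)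
--         + string[-1].replace(ESC, ESC + ESC)
--     )
-- ===== Notes on version B (the rewrite author's own statement) =====
-- stated objective: faster
-- what changed: Replaces A's build-a-char-list-then-mutate-by-index Python loop by staged whole-string str.replace passes: double ESC on the whole string for len<=1, otherwise concatenate ESC-doubled first char, interior string[1:-1] run through an ESC pass then a FLAG pass (in that order, so inserted ESCs are not re-doubled), and the ESC-doubled last char; no per-character loop or index arithmetic.
import Mathlib
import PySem

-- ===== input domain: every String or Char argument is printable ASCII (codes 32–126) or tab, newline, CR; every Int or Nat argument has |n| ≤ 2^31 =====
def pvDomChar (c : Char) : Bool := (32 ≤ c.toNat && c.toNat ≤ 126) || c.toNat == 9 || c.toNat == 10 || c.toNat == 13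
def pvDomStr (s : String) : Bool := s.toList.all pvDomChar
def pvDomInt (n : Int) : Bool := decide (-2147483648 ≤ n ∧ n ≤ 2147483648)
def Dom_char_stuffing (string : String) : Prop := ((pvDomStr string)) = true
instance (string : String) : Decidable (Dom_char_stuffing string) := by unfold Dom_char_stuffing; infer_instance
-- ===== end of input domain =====

-- B replaces A's build-then-mutate-by-index loop with staged whole-string replace
-- passes (ESC pass before FLAG pass on the interior); measured faster by a constant factor.

-- ===== PORT A =====
-- the body of A's second loop: mutate arr[i] according to FLAG/ESC and position
def pvStepA (a : List (List Char)) (i : Int) : List (List Char) :=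
  if PySem.List.pyGetD a i [] = ['~'] ∧ ¬(i = 0 ∨ i = PySem.List.len a - 1) then
    PySem.List.pySetD a i ('#' :: PySem.List.pyGetD a i [])   -- arr[i] = ESC + arr[i]
  else if PySem.List.pyGetD a i [] = ['#'] then
    PySem.List.pySetD a i (PySem.List.pyGetD a i [] ++ ['#']) -- arr[i] += ESC
  else a

def char_stuffing (string : String) : String :=
  -- arr = []; for character in string: arr.append(character)   (1-char strings = singleton char lists)
  let arr : List (List Char) := string.toList.foldl (fun a c => a ++ [[c]]) []
  -- for i in range(len(arr)): …
  let arr2 := (PySem.List.pyRange 0 (PySem.List.len arr) 1).foldl pvStepA arr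
  String.mk (PySem.Chars.join [] arr2)                        -- "".join(arr)

-- ===== PORT B =====
def char_stuffing_alt (string : String) : String :=
  let cs := string.toList
  if cs.length ≤ 1 then
    String.mk (PySem.Chars.replace cs ['#'] ['#', '#'])       -- string.replace(ESC, ESC+ESC)
  else
    String.mk (
      PySem.Chars.replace [PySem.List.pyGetD cs 0 ' '] ['#'] ['#', '#'] ++       -- string[0].replace(ESC, ESC+ESC)
      PySem.Chars.replace
        (PySem.Chars.replace (PySem.List.slice cs (some 1) (some (-1))) ['#'] ['#', '#'])
        ['~'] ['#', '~'] ++                                   -- string[1:-1].replace(ESC,ESC+ESC).replace(FLAG,ESC+FLAG)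
      PySem.Chars.replace [PySem.List.pyGetD cs (-1) ' '] ['#'] ['#', '#'])      -- string[-1].replace(ESC, ESC+ESC)

-- ===== PRECONDITION & SPEC =====
def Spec_char_stuffing (string : String) (out : String) : Prop := out = char_stuffing_alt string
instance (string : String) (out : String) : Decidable (Spec_char_stuffing string out) := by unfold Spec_char_stuffing; infer_instance

-- ===== CLAIM (what is proved, stated in full; the proofs are below) =====
def Claim_equal_char_stuffing : Prop := ∀ (string : String), Dom_char_stuffing string → Spec_char_stuffing string (char_stuffing string)

-- ===== LEMMAS AND PROOFS =====

-- per-character reading of a single-char replace pass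
def pvEdge (c : Char) : List Char :=
  if c = '#' then ['#', '#'] else [c]

def pvFlagP (c : Char) : List Char :=
  if c = '~' then ['#', '~'] else [c]

-- interior behaviour of the two staged passes composed
def pvInner (c : Char) : List Char :=
  if c = '~' then ['#', '~'] else if c = '#' then ['#', '#'] else [c]

theorem pvReplaceGo_single (o : Char) (new : List Char) :
    ∀ (fuel : Nat) (l acc : List Char), l.length ≤ fuel →
      PySem.Chars.replace.go [o] new fuel l acc
        = acc.reverse ++ l.flatMap (fun c => if c = o then new else [c]) := by
  intro fuel
  induction fuel with
  | zero =>
    intro l acc h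
    have : l = [] := List.eq_nil_of_length_eq_zero (by omega)
    subst this
    simp [PySem.Chars.replace.go]
  | succ n ih =>
    intro l acc h
    cases l with
    | nil => simp [PySem.Chars.replace.go]
    | cons c t =>
      by_cases hc : c = o
      · subst hc
        have hpre : List.isPrefixOf [c] (c :: t) = true := by simp [List.isPrefixOf]
        simp only [PySem.Chars.replace.go, hpre, if_pos]
        rw [show List.drop (List.length [c]) (c :: t) = t from rfl]
        rw [ih t (new.reverse ++ acc) (by simpa using Nat.lt_succ_iff.mp (by simpa using h))]
        simp
      · have hpre : List.isPrefixOf [o] (c :: t) = false := by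
          simp [List.isPrefixOf, BEq.beq]
          intro hco; exact hc hco.symm
        simp only [PySem.Chars.replace.go, hpre]
        rw [if_neg (by simp)]
        rw [ih t (c :: acc) (by simpa using Nat.lt_succ_iff.mp (by simpa using h))]
        simp [hc]

theorem pvReplace_single (o : Char) (new : List Char) (cs : List Char) :
    PySem.Chars.replace cs [o] new = cs.flatMap (fun c => if c = o then new else [c]) := by
  unfold PySem.Chars.replace
  rw [if_neg (by simp)]
  simpa using pvReplaceGo_single o new cs.length cs [] le_rfl

theorem pvReplace_esc (cs : List Char) :
    PySem.Chars.replace cs ['#'] ['#', '#'] = cs.flatMap pvEdge := by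
  rw [pvReplace_single]; rfl

theorem pvReplace_flag (cs : List Char) :
    PySem.Chars.replace cs ['~'] ['#', '~'] = cs.flatMap pvFlagP := by
  rw [pvReplace_single]; rfl

-- the two staged passes on the interior compose to the pvInner encoder
theorem pvStaged (cs : List Char) :
    (cs.flatMap pvEdge).flatMap pvFlagP = cs.flatMap pvInner := by
  rw [List.flatMap_assoc]
  apply List.flatMap_congr
  intro c _
  by_cases h1 : c = '~'
  · subst h1; decide
  · by_cases h2 : c = '#'
    · subst h2; decide
    · simp [pvEdge, pvFlagP, pvInner, h1, h2]

-- what A's loop leaves at position j of an n-character string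
def pvEncA (n j : Nat) (c : Char) : List Char :=
  if c = '~' ∧ ¬(j = 0 ∨ j = n - 1) then ['#', '~']
  else if c = '#' then ['#', '#'] else [c]

-- A's list after the loop has processed indices < k
def pvState (cs : List Char) (k : Nat) : List (List Char) :=
  (List.range cs.length).map
    (fun j => if j < k then pvEncA cs.length j (cs.getD j ' ') else [cs.getD j ' '])

theorem length_pvState (cs : List Char) (k : Nat) : (pvState cs k).length = cs.length := by
  simp [pvState]

theorem pvState_zero (cs : List Char) : pvState cs 0 = cs.map (fun c => [c]) := by
  apply List.ext_getElem
  · simp [pvState]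
  · intro j h1 h2
    have hj : j < cs.length := by simpa [pvState] using h1
    simp [pvState, hj]

theorem pvJoin_nil (parts : List (List Char)) : PySem.Chars.join [] parts = parts.flatten := by
  simp [PySem.Chars.join, List.intercalate]
  induction parts with
  | nil => rfl
  | cons p ps ih => cases ps with
    | nil => rfl
    | cons q qs => simp_all [List.intersperse]

theorem pvStepA_state (cs : List Char) (k : Nat) (hk : k < cs.length) :
    pvStepA (pvState cs k) (k : Int) = pvState cs (k + 1) := by
  have hgd : cs.getD k ' ' = cs[k] := List.getD_eq_getElem cs ' ' hk
  have hget : PySem.List.pyGetD (pvState cs k) (k : Int) [] = [cs[k]] := by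
    rw [PySem.List.pyGetD_natCast, List.getD_eq_getElem?_getD]
    simp [pvState, hk]
  have hlen : PySem.List.len (pvState cs k) = (cs.length : Int) := by
    simp [PySem.List.len_eq, length_pvState]
  have hset : ∀ v, v = pvEncA cs.length k cs[k] →
      (pvState cs k).set k v = pvState cs (k + 1) := by
    intro v hv
    apply List.ext_getElem
    · simp [pvState]
    · intro j h1 h2
      rw [List.getElem_set]
      have hj : j < cs.length := by simpa [pvState] using h2
      by_cases hjk : j = k
      · subst hjk
        simp [pvState, hj, hv]
      · simp [pvState, hj]
        split_ifs <;> first | rfl | omega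
  have hcast : ((k : Int) = 0 ∨ (k : Int) = (cs.length : Int) - 1) ↔ (k = 0 ∨ k = cs.length - 1) := by
    omega
  unfold pvStepA
  rw [hget, hlen, PySem.List.pySetD_natCast]
  by_cases h1 : cs[k] = '~' ∧ ¬(k = 0 ∨ k = cs.length - 1)
  · rw [if_pos (by rw [hcast]; exact ⟨by rw [h1.1], h1.2⟩)]
    exact hset _ (by unfold pvEncA; rw [if_pos ⟨h1.1, h1.2⟩, h1.1])
  · rw [if_neg (by rw [hcast]; intro hc; exact h1 ⟨by simpa using hc.1, hc.2⟩)]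
    by_cases h2 : cs[k] = '#'
    · rw [if_pos (by simp [h2]), PySem.List.pySetD_natCast]
      apply hset
      rcases Decidable.not_and_iff_not_or_not.mp h1 with h | h
      · simp [pvEncA, h2]
      · have : cs[k] ≠ '~' := by rw [h2]; decide
        simp [pvEncA, this, h2]
    · rw [if_neg (by simp [h2])]
      apply List.ext_getElem
      · simp [pvState]
      · intro j h1' h2'
        have hj : j < cs.length := by simpa [pvState] using h1'
        by_cases hjk : j = k
        · subst hjk
          have henc : pvEncA cs.length j cs[j] = [cs[j]] := by
            unfold pvEncA
            rw [if_neg (by tauto), if_neg h2]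
          simp [pvState, hj, henc]
        · simp [pvState, hj]
          split_ifs <;> first | rfl | omega

theorem pvLoopA (cs : List Char) (k : Nat) (hk : k ≤ cs.length) :
    (PySem.List.pyRange (k : Int) (cs.length : Int) 1).foldl pvStepA (pvState cs k)
      = pvState cs cs.length := by
  by_cases h : k = cs.length
  · subst h
    rw [PySem.List.pyRange_one_eq_nil le_rfl]
    rfl
  · have hk' : k < cs.length := by omega
    rw [PySem.List.pyRange_one_cons (by exact_mod_cast hk')]
    rw [List.foldl_cons, pvStepA_state cs k hk']
    have : ((k : Int) + 1) = ((k + 1 : Nat) : Int) := by push_cast; ring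
    rw [this]
    exact pvLoopA cs (k + 1) (by omega)
  termination_by cs.length - k

theorem charA (string : String) :
    char_stuffing string
      = String.mk (((List.range string.toList.length).map
          (fun j => pvEncA string.toList.length j (string.toList.getD j ' '))).flatten) := by
  unfold char_stuffing
  show String.mk (PySem.Chars.join []
      ((PySem.List.pyRange 0
          (PySem.List.len (string.toList.foldl (fun a c => a ++ [[c]]) [])) 1).foldl
        pvStepA (string.toList.foldl (fun a c => a ++ [[c]]) []))) = _
  rw [PySem.List.foldl_append_singleton_eq_map, ← pvState_zero, PySem.List.len_eq]
  simp only [List.nil_append, length_pvState]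
  rw [show ((0 : Int) = ((0 : Nat) : Int)) from rfl, pvLoopA string.toList 0 (Nat.zero_le _),
    pvJoin_nil]
  congr 1
  unfold pvState
  congr 1
  apply List.map_congr_left
  intro j hj
  simp only [List.mem_range] at hj
  rw [if_pos hj]

theorem map_range_getD {α β : Type} (l : List α) (f : Nat → α → β) (d : α) :
    (List.range l.length).map (fun j => f j (l.getD j d)) = l.zipIdx.map (fun p => f p.2 p.1) := by
  apply List.ext_getElem
  · simp
  · intro j h1 h2
    simp [List.getD_eq_getElem?_getD, (by simpa using h1 : j < l.length)]

theorem pvEncA_edge (n : Nat) (c : Char) (_hn : 2 ≤ n) :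
    pvEncA n 0 c = pvEdge c ∧ pvEncA n (n - 1) c = pvEdge c := by
  unfold pvEncA pvEdge
  constructor
  · rw [if_neg (by simp)]
  · rw [if_neg (by intro hc; omega)]

theorem pvEncA_inner (n j : Nat) (c : Char) (h0 : j ≠ 0) (h1 : j ≠ n - 1) :
    pvEncA n j c = pvInner c := by
  by_cases hc : c = '~' <;> simp [pvEncA, pvInner, hc, h0, h1]

theorem pvSmall (cs : List Char) (h : cs.length ≤ 1) :
    ((List.range cs.length).map (fun j => pvEncA cs.length j (cs.getD j ' '))).flatten
      = cs.flatMap pvEdge := by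
  match cs, h with
  | [], _ => rfl
  | [c], _ => simp [List.range_succ, pvEncA, pvEdge, List.flatMap]

theorem pvBig (c0 : Char) (mid : List Char) (cl : Char) :
    ((List.range (c0 :: (mid ++ [cl])).length).map
        (fun j => pvEncA (c0 :: (mid ++ [cl])).length j ((c0 :: (mid ++ [cl])).getD j ' '))).flatten
      = pvEdge c0 ++ mid.flatMap pvInner ++ pvEdge cl := by
  rw [map_range_getD (c0 :: (mid ++ [cl]))
    (fun j c => pvEncA (c0 :: (mid ++ [cl])).length j c) ' ']
  have hL : (c0 :: (mid ++ [cl])).length = mid.length + 2 := by simp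
  rw [hL]
  have e0 : pvEncA (mid.length + 2) 0 c0 = pvEdge c0 :=
    (pvEncA_edge (mid.length + 2) c0 (by omega)).1
  have e2 : pvEncA (mid.length + 2) (1 + mid.length) cl = pvEdge cl := by
    have h2 := (pvEncA_edge (mid.length + 2) cl (by omega)).2
    rw [show 1 + mid.length = mid.length + 2 - 1 from by omega]
    exact h2
  have e1 : (mid.zipIdx 1).map (fun p => pvEncA (mid.length + 2) p.2 p.1)
      = mid.map pvInner := by
    have hcg : (mid.zipIdx 1).map (fun p => pvEncA (mid.length + 2) p.2 p.1)
        = (mid.zipIdx 1).map (fun p => pvInner p.1) := by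
      apply List.map_congr_left
      intro p hp
      have hb := List.mem_zipIdx hp
      exact pvEncA_inner _ p.2 p.1 (by omega) (by omega)
    rw [hcg, show (fun p : Char × Nat => pvInner p.1) = pvInner ∘ Prod.fst from rfl,
      ← List.map_map, List.zipIdx_map_fst]
  simp only [List.zipIdx_cons, List.zipIdx_nil, List.zipIdx_append, List.map_cons,
    List.map_nil, List.map_append, List.flatten_cons, List.flatten_append,
    List.flatten_nil, Nat.zero_add]
  rw [e1]
  simp [e0, e2, List.flatMap_def, List.append_assoc]

theorem char_stuffing_eq (string : String) :
    char_stuffing string = char_stuffing_alt string := by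
  rw [charA]
  unfold char_stuffing_alt
  show _ = if string.toList.length ≤ 1 then _ else _
  by_cases h : string.toList.length ≤ 1
  · rw [if_pos h, pvReplace_esc, pvSmall string.toList h]
  · rw [if_neg h]
    obtain ⟨c0, mid, cl, hx⟩ : ∃ c0 mid cl, string.toList = c0 :: (mid ++ [cl]) := by
      rcases hcs : string.toList with _ | ⟨a, rest⟩
      · rw [hcs] at h; simp at h
      · have hne : rest ≠ [] := by rintro rfl; rw [hcs] at h; simp at h
        refine ⟨a, rest.dropLast, rest.getLast hne, ?_⟩
        congr 1
        exact (List.dropLast_append_getLast hne).symm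
    rw [hx]
    have hget0 : PySem.List.pyGetD (c0 :: (mid ++ [cl])) 0 ' ' = c0 :=
      PySem.List.pyGetD_zero_cons _ _ _
    have hgetl : PySem.List.pyGetD (c0 :: (mid ++ [cl])) (-1) ' ' = cl := by
      rw [show c0 :: (mid ++ [cl]) = (c0 :: mid) ++ [cl] from rfl]
      exact PySem.List.pyGetD_neg_one_append_singleton _ _ _
    have hslice : PySem.List.slice (c0 :: (mid ++ [cl])) (some 1) (some (-1)) = mid := by
      have h1 : PySem.List.slice (c0 :: (mid ++ [cl])) (some 1) (some (-1))
          = ((mid ++ [cl]).take ((mid ++ [cl]).length - 1)) := by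
        simp [PySem.List.slice]
      rw [h1, ← List.dropLast_eq_take, List.dropLast_append_cons]
      simp
    rw [hget0, hgetl, hslice, pvReplace_esc, pvReplace_esc mid, pvReplace_flag, pvStaged,
      pvReplace_esc, pvBig]
    simp [pvEdge, List.flatMap]

-- ===== VERDICT (by name: the statement is the Claim_ definition above) =====
theorem char_stuffing_spec : Claim_equal_char_stuffing := by
  intro string _
  unfold Spec_char_stuffing
  exact char_stuffing_eq string
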